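-- pv_equiv track=rewrite | github.com/cstuartroe/misc | Python/TokiPonaAbbrevs/main.py | find_overlaps_helper
-- ===== SOURCE A (Python) =====
-- def find_overlaps_helper(roots: list[str], shorter: list[str], longer: list[str], max_recursion: int):
--     sstr = ''.join(shorter)
--     lstr = ''.join(longer)
--     assert lstr.startswith(sstr)
--
--     for root in roots:
--         if longer == [*shorter, root]:
--             continue
--
--         if (sstr + root).startswith(lstr):
--             yield longer, [*shorter, root]
--
--             if (sstr + root) != lstr and max_recursion > 0:
--                 yield from find_overlaps_helper(roots, longer, [*shorter, root], max_recursion - 1)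
-- ===== SOURCE B (Python) =====
-- def find_overlaps_helper(roots, shorter, longer, max_recursion):
--     # Iterative pre-order DFS with an explicit stack of resumable frames
--     # instead of recursion + `yield from`; returns the list of pairs.
--     sstr = ''.join(shorter)
--     lstr = ''.join(longer)
--     assert lstr.startswith(sstr)
--     out = []
--     stack = [(shorter, longer, max_recursion, 0)]
--     while stack:
--         sh, lg, mr, i = stack.pop()
--         if i >= len(roots):
--             continue
--         root = roots[i]
--         stack.append((sh, lg, mr, i + 1))
--         cand = [*sh, root]
--         if lg == cand:
--             continue
--         shstr = ''.join(sh)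
--         lgstr = ''.join(lg)
--         if (shstr + root).startswith(lgstr):
--             out.append((lg, cand))
--             if (shstr + root) != lgstr and mr > 0:
--                 stack.append((lg, cand, mr - 1, 0))
--     return out
-- ===== Notes on version B (the rewrite author's own statement) =====
-- stated objective: alternative
-- what changed: Replaces A's recursive generator (for-loop with yield from) by an iterative pre-order DFS over an explicit stack of resumable (shorter, longer, max_recursion, root_index) frames that appends matches to an output list.
import Mathlib
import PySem

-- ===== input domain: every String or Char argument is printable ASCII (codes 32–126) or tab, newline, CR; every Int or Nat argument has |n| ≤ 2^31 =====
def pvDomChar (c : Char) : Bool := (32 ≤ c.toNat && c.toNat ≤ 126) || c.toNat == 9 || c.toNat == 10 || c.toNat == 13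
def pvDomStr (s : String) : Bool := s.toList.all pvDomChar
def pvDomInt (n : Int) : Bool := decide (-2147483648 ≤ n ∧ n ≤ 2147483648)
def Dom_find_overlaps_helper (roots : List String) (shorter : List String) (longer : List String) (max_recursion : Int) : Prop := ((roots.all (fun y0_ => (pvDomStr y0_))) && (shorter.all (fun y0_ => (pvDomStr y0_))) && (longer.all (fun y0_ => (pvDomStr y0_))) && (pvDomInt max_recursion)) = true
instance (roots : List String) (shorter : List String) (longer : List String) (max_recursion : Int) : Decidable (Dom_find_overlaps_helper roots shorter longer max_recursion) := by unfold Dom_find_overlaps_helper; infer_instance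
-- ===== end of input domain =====

-- B replaces A's recursive generator by an iterative pre-order DFS over an explicit
-- stack of resumable frames (alternative decomposition; same yield order proved equal).

-- ===== PORT A =====
-- Int.toNat arithmetic cited by name in both ports' decreasing_by
theorem foh_toNat_pos (mr : Int) (h : 0 < mr) : 0 < mr.toNat :=
  Int.natCast_pos.mp (by rw [Int.toNat_of_nonneg h.le]; exact h)

theorem foh_toNat_succ (mr : Int) (h : 0 < mr) : (mr - 1).toNat + 1 = mr.toNat := by
  rw [Int.pred_toNat]; exact Nat.succ_pred_eq_of_pos (foh_toNat_pos mr h)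

theorem foh_toNat_lt (mr : Int) (h : 0 < mr) : (mr - 1).toNat < mr.toNat :=
  foh_toNat_succ mr h ▸ Nat.lt_succ_self _

-- A's `for root in roots` loop with its `yield from` recursion; `rest` is the part of
-- `roots` the loop has still to visit.  `sstr`/`lstr` are recomputed here at each loop
-- step instead of once per call — they are the joins of the unchanged `shorter`/`longer`,
-- so the values are identical to A's.  The recursive call's `assert` always succeeds
-- (its arguments satisfy it by the `startswith` test that guards the call), so it is
-- not re-checked here.
def find_overlaps_helper_go (roots : List String) (shorter : List String) (longer : List String) (max_recursion : Int) (rest : List String) : List (List String × List String) :=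
  match rest with
  | [] => []
  | root :: rest' =>
    let sstr := PySem.Str.join "" shorter
    let lstr := PySem.Str.join "" longer
    (if longer = shorter ++ [root] then []      -- continue
     else if PySem.Str.startswith (sstr ++ root) lstr then
       (longer, shorter ++ [root]) ::           -- yield longer, [*shorter, root]
         (if hrec : sstr ++ root ≠ lstr ∧ max_recursion > 0 then
            find_overlaps_helper_go roots longer (shorter ++ [root]) (max_recursion - 1) roots
          else [])
     else []) ++ find_overlaps_helper_go roots shorter longer max_recursion rest'
termination_by (max_recursion.toNat, rest.length)
decreasing_by
  · exact Prod.Lex.left _ _ (foh_toNat_lt max_recursion hrec.2)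
  · exact Prod.Lex.right _ (by simp)

def find_overlaps_helper (roots : List String) (shorter : List String) (longer : List String) (max_recursion : Int) : List (List String × List String) :=
  let sstr := PySem.Str.join "" shorter
  let lstr := PySem.Str.join "" longer
  if PySem.Str.startswith lstr sstr then       -- assert lstr.startswith(sstr); Pre_ excludes the failing case
    find_overlaps_helper_go roots shorter longer max_recursion roots
  else []

-- ===== PORT B =====
-- weight of a frame, for termination of the stack loop only
def fohFrameWeight (n : Nat) (f : List String × List String × Int × Nat) : Nat :=
  (n - f.2.2.2) * (n + 1) ^ (f.2.2.1.toNat + 1) + 1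

-- termination arithmetic for the stack loop (cited by name in decreasing_by)
theorem foh_step_lt (n i t : Nat) (h : i < n) :
    (n - (i + 1)) * (n + 1) ^ (t + 1) < (n - i) * (n + 1) ^ (t + 1) :=
  (Nat.mul_lt_mul_right (Nat.pow_pos (Nat.succ_pos n))).mpr (Nat.sub_succ_lt_self n i h)

theorem foh_child_lt (n i : Nat) (mr : Int) (h : i < n) (hmr : 0 < mr) :
    n * (n + 1) ^ ((mr - 1).toNat + 1) + 1 + ((n - (i + 1)) * (n + 1) ^ (mr.toNat + 1) + 1)
      < (n - i) * (n + 1) ^ (mr.toNat + 1) + 1 := by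
  rw [foh_toNat_succ mr hmr]
  have hn : 0 < n := Nat.lt_of_le_of_lt (Nat.zero_le i) h
  have h2 : 2 ≤ (n + 1) ^ mr.toNat :=
    le_trans (Nat.succ_le_succ hn)
      (Nat.le_self_pow (Nat.pos_iff_ne_zero.mp (foh_toNat_pos mr hmr)) (n + 1))
  have e1 : n - (i + 1) + 1 = n - i := by
    rw [Nat.sub_succ]; exact Nat.succ_pred_eq_of_pos (Nat.sub_pos_of_lt h)
  have hY : (n - i) * (n + 1) ^ (mr.toNat + 1)
      = (n - (i + 1)) * (n + 1) ^ (mr.toNat + 1) + (n + 1) ^ (mr.toNat + 1) := by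
    rw [← e1, Nat.succ_mul]
  have hP : (n + 1) ^ (mr.toNat + 1) = n * (n + 1) ^ mr.toNat + (n + 1) ^ mr.toNat := by
    rw [pow_succ', Nat.succ_mul]
  rw [hY, hP]
  generalize n * (n + 1) ^ mr.toNat = A
  generalize (n + 1) ^ mr.toNat = p at h2 ⊢
  generalize (n - (i + 1)) * (A + p) = X
  have c2 : X + (A + p) + 1 = A + X + p + 1 := by rw [← Nat.add_assoc, Nat.add_comm X A]
  rw [c2]
  calc A + 1 + (X + 1) = A + X + (1 + 1) := Nat.add_add_add_comm A 1 X 1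
    _ ≤ A + X + p := Nat.add_le_add_left h2 _
    _ < A + X + p + 1 := Nat.lt_succ_self _

-- Source B's while-loop: head of the list = top of Python's stack (append/pop at the end)
-- Source B's while-loop: head of the list = top of Python's stack (append/pop at the end)
def find_overlaps_helper_run (roots : List String) (stack : List (List String × List String × Int × Nat)) (out : List (List String × List String)) : List (List String × List String) :=
  match stack with
  | [] => out
  | (sh, lg, mr, i) :: rest =>
    if h : i < roots.length then
      let root := roots[i]
      let resume := (sh, lg, mr, i + 1)
      let cand := sh ++ [root]
      if lg = cand then
        find_overlaps_helper_run roots (resume :: rest) out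
      else
        let shstr := PySem.Str.join "" sh
        let lgstr := PySem.Str.join "" lg
        if PySem.Str.startswith (shstr ++ root) lgstr then
          if hrec : shstr ++ root ≠ lgstr ∧ mr > 0 then
            find_overlaps_helper_run roots ((lg, cand, mr - 1, 0) :: resume :: rest) (out ++ [(lg, cand)])
          else
            find_overlaps_helper_run roots (resume :: rest) (out ++ [(lg, cand)])
        else
          find_overlaps_helper_run roots (resume :: rest) out
    else
      find_overlaps_helper_run roots rest out
termination_by (stack.map (fohFrameWeight roots.length)).sum
decreasing_by
  · simp only [List.map_cons, List.sum_cons, fohFrameWeight]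
    exact Nat.add_lt_add_right (Nat.add_lt_add_right (foh_step_lt roots.length i mr.toNat h) 1) _
  · simp only [List.map_cons, List.sum_cons, fohFrameWeight, Nat.sub_zero]
    rw [← Nat.add_assoc]
    exact Nat.add_lt_add_right (foh_child_lt roots.length i mr h hrec.2) _
  · simp only [List.map_cons, List.sum_cons, fohFrameWeight]
    exact Nat.add_lt_add_right (Nat.add_lt_add_right (foh_step_lt roots.length i mr.toNat h) 1) _
  · simp only [List.map_cons, List.sum_cons, fohFrameWeight]
    exact Nat.add_lt_add_right (Nat.add_lt_add_right (foh_step_lt roots.length i mr.toNat h) 1) _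
  · simp only [List.map_cons, List.sum_cons, fohFrameWeight]
    exact Nat.lt_add_of_pos_left (Nat.succ_pos _)

def find_overlaps_helper_alt (roots : List String) (shorter : List String) (longer : List String) (max_recursion : Int) : List (List String × List String) :=
  let sstr := PySem.Str.join "" shorter
  let lstr := PySem.Str.join "" longer
  if PySem.Str.startswith lstr sstr then       -- assert lstr.startswith(sstr); Pre_ excludes the failing case
    find_overlaps_helper_run roots [(shorter, longer, max_recursion, 0)] []
  else []

-- ===== PRECONDITION & SPEC =====
-- Pre_ excludes exactly the inputs on which A's top-level `assert lstr.startswith(sstr)`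
-- raises AssertionError (A returns no value there).
def Pre_find_overlaps_helper (roots : List String) (shorter : List String) (longer : List String) (max_recursion : Int) : Prop :=
  PySem.Str.startswith (PySem.Str.join "" longer) (PySem.Str.join "" shorter) = true
instance (roots : List String) (shorter : List String) (longer : List String) (max_recursion : Int) : Decidable (Pre_find_overlaps_helper roots shorter longer max_recursion) := by unfold Pre_find_overlaps_helper; infer_instance

def pvWitness_find_overlaps_helper : List String × List String × List String × Int :=
  (["a"], [], ["a"], 1)

def Spec_find_overlaps_helper (roots : List String) (shorter : List String) (longer : List String) (max_recursion : Int) (out : List (List String × List String)) : Prop := out = find_overlaps_helper_alt roots shorter longer max_recursion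
instance (roots : List String) (shorter : List String) (longer : List String) (max_recursion : Int) (out : List (List String × List String)) : Decidable (Spec_find_overlaps_helper roots shorter longer max_recursion out) := by unfold Spec_find_overlaps_helper; infer_instance

-- ===== CLAIM (what is proved, stated in full; the proofs are below) =====
def Claim_equal_find_overlaps_helper : Prop := ∀ (roots : List String) (shorter : List String) (longer : List String) (max_recursion : Int), Dom_find_overlaps_helper roots shorter longer max_recursion → Pre_find_overlaps_helper roots shorter longer max_recursion → Spec_find_overlaps_helper roots shorter longer max_recursion (find_overlaps_helper roots shorter longer max_recursion)

-- ===== LEMMAS AND PROOFS =====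

-- the part of A's output a frame (sh, lg, mr, i) still has to produce
def fohPhi (roots : List String) (f : List String × List String × Int × Nat) : List (List String × List String) :=
  find_overlaps_helper_go roots f.1 f.2.1 f.2.2.1 (roots.drop f.2.2.2)

-- one step of A's loop, phrased on a frame
theorem fohPhi_step (roots sh lg : List String) (mr : Int) (i : Nat) (h : i < roots.length) :
    fohPhi roots (sh, lg, mr, i) =
      (if lg = sh ++ [roots[i]] then []
       else if PySem.Str.startswith (PySem.Str.join "" sh ++ roots[i]) (PySem.Str.join "" lg) then
         (lg, sh ++ [roots[i]]) ::
           (if PySem.Str.join "" sh ++ roots[i] ≠ PySem.Str.join "" lg ∧ mr > 0 then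
              fohPhi roots (lg, sh ++ [roots[i]], mr - 1, 0)
            else [])
       else []) ++ fohPhi roots (sh, lg, mr, i + 1) := by
  unfold fohPhi
  dsimp only
  rw [← List.getElem_cons_drop (h := h)]
  rw [find_overlaps_helper_go.eq_def]
  simp only [dite_eq_ite, List.drop_zero]

theorem fohPhi_end (roots sh lg : List String) (mr : Int) (i : Nat) (h : roots.length ≤ i) :
    fohPhi roots (sh, lg, mr, i) = [] := by
  unfold fohPhi
  rw [List.drop_eq_nil_of_le h, find_overlaps_helper_go]

-- loop invariant: the stack machine appends, in order, each frame's remaining A-output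
theorem fohRun_eq (roots : List String) (stack : List (List String × List String × Int × Nat)) (out : List (List String × List String)) :
    find_overlaps_helper_run roots stack out = out ++ (stack.map (fohPhi roots)).flatten := by
  fun_induction find_overlaps_helper_run roots stack out with
  | case1 => simp
  | case2 out sh mr i rest h root cand resume ih =>
    rw [ih]
    simp only [root, cand, resume, List.map_cons, List.flatten_cons]
    rw [fohPhi_step roots sh (sh ++ [roots[i]]) mr i h]
    simp
  | case3 out sh lg mr i rest h root resume cand hskip shstr lgstr hm hrec ih =>
    rw [ih]
    simp only [root, resume, cand, shstr, lgstr, List.map_cons, List.flatten_cons] at hskip hm hrec ⊢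
    rw [fohPhi_step roots sh lg mr i h, if_neg hskip, if_pos hm, if_pos hrec]
    simp
  | case4 out sh lg mr i rest h root resume cand hskip shstr lgstr hm hrec ih =>
    rw [ih]
    simp only [root, resume, cand, shstr, lgstr, List.map_cons, List.flatten_cons] at hskip hm hrec ⊢
    rw [fohPhi_step roots sh lg mr i h, if_neg hskip, if_pos hm, if_neg hrec]
    simp
  | case5 out sh lg mr i rest h root resume cand hskip shstr lgstr hm ih =>
    rw [ih]
    simp only [root, resume, cand, shstr, lgstr, List.map_cons, List.flatten_cons] at hskip hm ⊢
    rw [fohPhi_step roots sh lg mr i h, if_neg hskip, if_neg hm]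
    simp
  | case6 out sh lg mr i rest h ih =>
    rw [ih]
    simp only [List.map_cons, List.flatten_cons, fohPhi_end roots sh lg mr i (by omega)]
    simp

-- ===== VERDICT (by name: the statement is the Claim_ definition above) =====
theorem find_overlaps_helper_spec : Claim_equal_find_overlaps_helper := by
  intro roots shorter longer max_recursion _ hpre
  unfold Spec_find_overlaps_helper find_overlaps_helper find_overlaps_helper_alt
  have hp : PySem.Str.startswith (PySem.Str.join "" longer) (PySem.Str.join "" shorter) = true := hpre
  dsimp only
  rw [if_pos hp, if_pos hp, fohRun_eq]
  simp [fohPhi]
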